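-- pv_equiv track=rewrite | github.com/DKIMDK/SSAFY | algorithm/Aug/0807/count_str.py | strcnt
-- ===== SOURCE A (Python) =====
-- def strcnt(str1, str2):
--     max_cnt = 0
--     for index1 in range(len(str1)):
--         cnt = 0
--         for index2 in range(len(str2)):
--             if str1[index1] == str2[index2]:
--                 cnt += 1
--         if max_cnt < cnt:
--             max_cnt = cnt
--     return max_cnt
-- ===== SOURCE B (Python) =====
-- def strcnt(str1, str2):
--     counts = {}
--     for ch in str2:
--         counts[ch] = counts.get(ch, 0) + 1
--     max_cnt = 0
--     for ch in str1:
--         c = counts.get(ch, 0)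
--         if c > max_cnt:
--             max_cnt = c
--     return max_cnt
-- ===== Notes on version B (the rewrite author's own statement) =====
-- stated objective: faster
-- what changed: Replaces the nested rescans (for each char of str1, a full scan of str2) with one dict-counting pass over str2 followed by a single lookup pass over str1.
import Mathlib
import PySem

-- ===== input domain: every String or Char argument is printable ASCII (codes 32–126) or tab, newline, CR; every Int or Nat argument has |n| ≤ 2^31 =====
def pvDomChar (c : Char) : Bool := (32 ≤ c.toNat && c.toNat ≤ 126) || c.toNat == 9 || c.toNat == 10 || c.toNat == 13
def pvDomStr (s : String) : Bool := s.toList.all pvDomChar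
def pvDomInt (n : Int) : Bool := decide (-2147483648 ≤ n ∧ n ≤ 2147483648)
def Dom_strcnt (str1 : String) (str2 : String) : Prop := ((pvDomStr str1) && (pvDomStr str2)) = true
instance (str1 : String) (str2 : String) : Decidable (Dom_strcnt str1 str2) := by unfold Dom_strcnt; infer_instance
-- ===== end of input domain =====

-- B replaces A's nested rescans of str2 with one dict-counting pass over str2 and a single lookup pass over str1 (faster; return value only).

-- ===== PORT A =====
-- nested index loops: for index1 in range(len(str1)): count str1[index1] in str2 by scanning range(len(str2))
def strcnt (str1 : String) (str2 : String) : Int :=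
  let l1 := str1.toList
  let l2 := str2.toList
  (PySem.List.pyRange 0 (l1.length : Int) 1).foldl (fun max_cnt index1 =>
    let cnt := (PySem.List.pyRange 0 (l2.length : Int) 1).foldl (fun cnt index2 =>
      if PySem.List.pyGetD l1 index1 ' ' = PySem.List.pyGetD l2 index2 ' ' then cnt + 1 else cnt) (0 : Int)
    if max_cnt < cnt then cnt else max_cnt) 0

-- ===== PORT B =====
-- counts = {}; for ch in str2: counts[ch] = counts.get(ch,0)+1; then one max-lookup pass over str1
def strcnt_alt (str1 : String) (str2 : String) : Int :=
  let counts : PySem.Dict Char Int :=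
    str2.toList.foldl (fun d ch => d.insert ch (d.getD ch 0 + 1)) PySem.Dict.empty
  str1.toList.foldl (fun max_cnt ch =>
    let c := counts.getD ch 0
    if c > max_cnt then c else max_cnt) 0

-- ===== PRECONDITION & SPEC =====
def Spec_strcnt (str1 : String) (str2 : String) (out : Int) : Prop := out = strcnt_alt str1 str2
instance (str1 : String) (str2 : String) (out : Int) : Decidable (Spec_strcnt str1 str2 out) := by unfold Spec_strcnt; infer_instance

-- ===== CLAIM (what is proved, stated in full; the proofs are below) =====
def Claim_equal_strcnt : Prop := ∀ (str1 : String) (str2 : String), Dom_strcnt str1 str2 → Spec_strcnt str1 str2 (strcnt str1 str2)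

-- ===== LEMMAS AND PROOFS =====

-- A's inner loop over indices of l2 is the count of c in l2
theorem strcnt_inner_count (c : Char) (l2 : List Char) :
    (PySem.List.pyRange 0 (l2.length : Int) 1).foldl (fun cnt index2 =>
      if c = PySem.List.pyGetD l2 index2 ' ' then cnt + 1 else cnt) (0 : Int) = (l2.count c : Int) := by
  rw [PySem.List.foldl_pyRange_zero_pyGetD' l2 ' ' (fun cnt x => if c = x then cnt + 1 else cnt) 0]
  have := PySem.List.foldl_beq_add_one l2 c 0
  simp only [zero_add] at this
  rw [← this]
  apply PySem.List.foldl_congr_mem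
  intro acc x _
  by_cases h : c = x
  · simp [h]
  · have hx : (x == c) = false := by
      simp only [beq_eq_false_iff_ne, ne_eq]
      exact fun e => h e.symm
    simp [h, hx]

theorem strcnt_spec : Claim_equal_strcnt := by
  intro str1 str2 _
  unfold Spec_strcnt strcnt strcnt_alt
  rw [PySem.List.foldl_pyRange_zero_pyGetD' str1.toList ' '
      (fun max_cnt c =>
        let cnt := (PySem.List.pyRange 0 (str2.toList.length : Int) 1).foldl (fun cnt index2 =>
          if c = PySem.List.pyGetD str2.toList index2 ' ' then cnt + 1 else cnt) (0 : Int)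
        if max_cnt < cnt then cnt else max_cnt) 0]
  apply PySem.List.foldl_congr_mem
  intro acc c _
  simp only [strcnt_inner_count, PySem.Dict.getD_foldl_insert_add_one, gt_iff_lt]
  simp
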